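-- pv_equiv track=rewrite | github.com/Xieyangxinyu/reasoning_uncertainty | src/logits/deer.py | prefixes_until_each_continue
-- ===== SOURCE A (Python) =====
-- from typing import Any, Dict, List, Tuple
--
-- def prefixes_until_each_continue(full_prompt: str, continue_str: str) -> List[str]:
--     parts = full_prompt.split(continue_str)
--
--     prefixes = []
--     running = ""
--
--     for i in range(len(parts) - 1):  # each continue_str occurrence
--         running += parts[i]
--         prefixes.append(running)
--
--     return prefixes
-- ===== SOURCE B (Python) =====
-- def prefixes_until_each_continue(full_prompt: str, continue_str: str):
--     parts = full_prompt.split(continue_str)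
--     joined = "".join(parts)
--     return [joined[:sum(len(p) for p in parts[:i])] for i in range(1, len(parts))]
-- ===== Notes on version B (the rewrite author's own statement) =====
-- stated objective: alternative
-- what changed: B has no accumulator loop at all: it precomputes the separator-free concatenation once and returns a comprehension that slices it at each cumulative part length, instead of A's loop appending into a growing running string and collecting it each iteration.
import Mathlib
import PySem

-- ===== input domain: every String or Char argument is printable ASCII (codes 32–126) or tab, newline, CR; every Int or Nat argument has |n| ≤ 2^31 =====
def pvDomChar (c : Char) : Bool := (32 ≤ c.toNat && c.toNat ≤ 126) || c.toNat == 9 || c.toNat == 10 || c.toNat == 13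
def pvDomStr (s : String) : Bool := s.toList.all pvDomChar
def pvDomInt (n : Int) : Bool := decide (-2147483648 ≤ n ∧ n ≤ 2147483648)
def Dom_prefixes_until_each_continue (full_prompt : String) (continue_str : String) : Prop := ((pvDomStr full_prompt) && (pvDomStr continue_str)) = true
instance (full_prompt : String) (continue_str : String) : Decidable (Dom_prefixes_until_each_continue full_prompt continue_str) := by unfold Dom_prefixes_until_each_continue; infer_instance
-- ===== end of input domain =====

-- B drops A's accumulator loop entirely: it builds the separator-free concatenation once and
-- slices it at each cumulative part length via comprehensions (objective: alternative).

-- ===== PORT A =====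
def prefixes_until_each_continue (full_prompt : String) (continue_str : String) : List String :=
  match PySem.Str.split? full_prompt continue_str with
  | none => []  -- continue_str = "" : Python raises ValueError; excluded by Pre_
  | some parts =>
    ((PySem.List.pyRange 0 ((parts.length : Int) - 1) 1).foldl
      (fun (st : List String × String) i =>
        let running := st.2 ++ PySem.List.pyGetD parts i ""
        (st.1 ++ [running], running))
      ([], "")).1

-- ===== PORT B =====
def prefixes_until_each_continue_alt (full_prompt : String) (continue_str : String) : List String :=
  match PySem.Str.split? full_prompt continue_str with
  | none => []  -- continue_str = "" : Python raises ValueError; excluded by Pre_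
  | some parts =>
    let joined := PySem.Str.join "" parts
    (PySem.List.pyRange 1 (PySem.List.len parts) 1).map
      (fun i => PySem.Str.slice joined none
        (some (((PySem.List.slice parts none (some i)).map (fun p => PySem.Str.len p)).sum)))

-- ===== PRECONDITION & SPEC =====
-- Pre_ excludes exactly continue_str = "", on which Python's str.split raises ValueError in both A and B.
def Pre_prefixes_until_each_continue (full_prompt : String) (continue_str : String) : Prop :=
  continue_str ≠ ""
instance (full_prompt : String) (continue_str : String) : Decidable (Pre_prefixes_until_each_continue full_prompt continue_str) := by unfold Pre_prefixes_until_each_continue; infer_instance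
def pvWitness_prefixes_until_each_continue : String × String := ("x|y|z", "|")

def Spec_prefixes_until_each_continue (full_prompt : String) (continue_str : String) (out : List String) : Prop := out = prefixes_until_each_continue_alt full_prompt continue_str
instance (full_prompt : String) (continue_str : String) (out : List String) : Decidable (Spec_prefixes_until_each_continue full_prompt continue_str out) := by unfold Spec_prefixes_until_each_continue; infer_instance

-- ===== CLAIM (what is proved, stated in full; the proofs are below) =====
def Claim_equal_prefixes_until_each_continue : Prop := ∀ (full_prompt : String) (continue_str : String), Dom_prefixes_until_each_continue full_prompt continue_str → Pre_prefixes_until_each_continue full_prompt continue_str → Spec_prefixes_until_each_continue full_prompt continue_str (prefixes_until_each_continue full_prompt continue_str)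

-- ===== LEMMAS AND PROOFS =====

-- the list of running prefixes A builds, as a structural recursion
def pvPrefixStrings (run : String) : List String → List String
  | [] => []
  | p :: ps => (run ++ p) :: pvPrefixStrings (run ++ p) ps

-- the common characterisation both sides are reduced to
def pvIdeal (qs : List String) : List String :=
  (List.range qs.length).map (fun k => String.ofList ((qs.take (k+1)).map String.toList).flatten)

theorem pvFoldA (ps : List String) (acc : List String) (run : String) :
    (ps.foldl (fun (st : List String × String) p =>
        ((st.1 ++ [st.2 ++ p], st.2 ++ p) : List String × String)) (acc, run)).1
      = acc ++ pvPrefixStrings run ps := by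
  induction ps generalizing acc run with
  | nil => simp [pvPrefixStrings]
  | cons p ps ih => simp [pvPrefixStrings, ih]

theorem pvJoinNilFlatten (css : List (List Char)) :
    PySem.Chars.join [] css = css.flatten := by
  induction css with
  | nil => simp [PySem.Chars.join_nil]
  | cons c cs ih =>
    cases cs with
    | nil => simp [PySem.Chars.join_singleton]
    | cons d ds => rw [PySem.Chars.join_cons_cons]; simp [ih]

theorem pvPrefixStrings_eq (qs : List String) : ∀ (acc : String),
    pvPrefixStrings acc qs
      = (List.range qs.length).map
          (fun k => String.ofList (acc.toList ++ ((qs.take (k+1)).map String.toList).flatten)) := by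
  induction qs with
  | nil => intro acc; simp [pvPrefixStrings]
  | cons q qs ih =>
    intro acc
    simp only [pvPrefixStrings, List.length_cons, List.range_succ_eq_map, List.map_cons,
      List.map_map]
    refine congrArg₂ List.cons ?_ ?_
    · apply String.ext; simp
    · rw [ih (acc ++ q)]
      refine List.map_congr_left ?_
      intro k _
      simp [List.append_assoc]

-- ===== VERDICT (by name: the statement is the Claim_ definition above) =====
theorem prefixes_until_each_continue_spec : Claim_equal_prefixes_until_each_continue := by
  intro full_prompt continue_str _ _
  unfold Spec_prefixes_until_each_continue prefixes_until_each_continue prefixes_until_each_continue_alt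
  cases h : PySem.Str.split? full_prompt continue_str with
  | none => rfl
  | some parts =>
  simp only []
  rcases List.eq_nil_or_concat parts with rfl | ⟨qs, last, rfl⟩
  · rw [show ((([] : List String).length : Int) - 1) = -1 by simp,
      PySem.List.pyRange_one_eq_nil (by norm_num),
      show PySem.List.len ([] : List String) = 0 by simp [PySem.List.len],
      PySem.List.pyRange_one_eq_nil (by norm_num)]
    simp
  · -- A side: fold over the index range = fold over qs = pvPrefixStrings
    simp only [List.concat_eq_append]
    have hlen : (((qs ++ [last]).length : Int) - 1) = ((qs.length : Nat) : Int) := by simp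
    rw [hlen]
    rw [PySem.List.foldl_congr_mem (PySem.List.pyRange 0 (qs.length : Int) 1) _
      (fun (st : List String × String) i =>
        let running := st.2 ++ PySem.List.pyGetD qs i ""
        (st.1 ++ [running], running)) ([], "")
      (by
        intro acc i hi
        have hmem := (PySem.List.mem_pyRange_one (a := 0) (b := (qs.length : Int)) (x := i)).1 hi
        have h1 : PySem.List.pyGetD (qs ++ [last]) i "" = PySem.List.pyGetD qs i "" := by
          rw [PySem.List.pyGetD_eq_getElem _ _ hmem.1 (by simp only [List.length_append, List.length_cons, List.length_nil]; omega),
            PySem.List.pyGetD_eq_getElem _ _ hmem.1 hmem.2]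
          rw [List.getElem_append_left]
        simp only [h1])]
    rw [show ((qs.length : Nat) : Int) = PySem.List.len qs by simp [PySem.List.len],
      PySem.List.foldl_pyRange_zero_pyGetD qs ""
        (fun (st : List String × String) p =>
          let running := st.2 ++ p
          (st.1 ++ [running], running)) ([], "")]
    have hA : (qs.foldl (fun (st : List String × String) p =>
        ((st.1 ++ [st.2 ++ p], st.2 ++ p) : List String × String)) ([], "")).1
        = pvPrefixStrings "" qs := pvFoldA qs [] ""
    -- B side: the range [1, n) as mapped List.range, then pointwise slicing facts
    have hlenB : PySem.List.len (qs ++ [last]) = ((qs.length : Nat) : Int) + 1 := by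
      simp [PySem.List.len]
    rw [hA, hlenB, pvPrefixStrings_eq qs ""]
    rw [PySem.List.pyRange_one]
    rw [show ((((qs.length : Nat) : Int) + 1 - 1).toNat) = qs.length by omega]
    rw [List.map_map]
    refine List.map_congr_left ?_
    intro k hk
    have hk' : k < qs.length := List.mem_range.1 hk
    -- reduce B's element at index k
    have hidx : ((1 : Int) + (k : Int)) = (((k + 1 : Nat)) : Int) := by push_cast; ring
    simp only [Function.comp_apply, hidx]
    rw [PySem.List.slice_to_natCast]
    rw [List.take_append_of_le_length (by omega)]
    -- the cut position is the length of the flattened taken prefix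
    have hsum : (((qs.take (k+1)).map (fun p => PySem.Str.len p)).sum : Int)
        = ((((qs.take (k+1)).map String.toList).flatten.length : Nat) : Int) := by
      rw [List.length_flatten, List.map_map]
      rw [Nat.cast_list_sum, List.map_map]
      refine congrArg List.sum ?_
      refine List.map_congr_left ?_
      intro p _
      simp [PySem.Str.len]
    rw [hsum]
    -- slice the prebuilt concatenation at that position
    apply String.ext
    rw [PySem.Str.toList_slice, PySem.Chars.slice_eq_listSlice, PySem.List.slice_to_natCast]
    rw [PySem.Str.toList_join, show ("".toList : List Char) = [] from rfl, pvJoinNilFlatten]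
    rw [show qs ++ [last] = qs.take (k+1) ++ (qs.drop (k+1) ++ [last]) by
      rw [← List.append_assoc, List.take_append_drop]]
    rw [List.map_append, List.flatten_append, List.take_left' (by rfl)]
    simp
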